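-- pv_equiv track=rewrite | github.com/ma0723/Min_Algorithm | SWEA/SWEA_4366_정식이의은행업무.py | find
-- ===== SOURCE A (Python) =====
-- def find(second_number, third_number):
-- # 2진수 반전 / 3진수 반전 -> 10진수 변환 -> 같은 경우
--     second_lst = []
--     for i in range(len(second_number)):
--         change_num = [i for i in second_number]
--         # 값 변경을 위해 복제
--         # 2진수의 각 자리를 1 혹은 0 반전 모든 경우 list
--         for j in range(2):
--             if change_num[i] != j:
--                 change_num[i] = j
--             second_lst.append(second(change_num))
--     third_lst = []
--     for i in range(len(third_number)):
--         change_num = [i for i in third_number]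
--         # 값 변경을 위해 복제
--         # 3진수의 각 자리를 2, 1, 혹은 0 반전 모든 경우 list
--         for j in range(3):
--             if change_num[i] != j:
--                 change_num[i] = j
--             third_lst.append(third(change_num))
--     for i in second_lst:
--         for j in third_lst:
--             if i==j:
--             # 각 list의 같은 값 탐색
--                 return i
--
-- def second(num):
-- # 이진수를 십진수로 전환하는 함수
--     result = 0
--     for i in range(len(num)):
--         result += num[i]*(2**(len(num)-i-1))
--     return result
--
-- def third(num):
-- # 삼진수를 십진수로 전환하는 함수
--     result = 0
--     for i in range(len(num)):
--         result += num[i] * (3 ** (len(num) - i - 1))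
--     return result
-- ===== SOURCE B (Python) =====
-- def find(second_number, third_number):
--     # Convert once, then generate each single-digit-flip candidate with an O(1) delta;
--     # ternary candidates go into a set, binary candidates are probed in order.
--     v2 = 0
--     for d in second_number:
--         v2 = 2 * v2 + d
--     v3 = 0
--     for d in third_number:
--         v3 = 3 * v3 + d
--     targets = set()
--     w = 3 ** (len(third_number) - 1) if third_number else 0
--     for d in third_number:
--         base = v3 - d * w
--         targets.add(base)
--         targets.add(base + w)
--         targets.add(base + 2 * w)
--         w //= 3
--     w = 2 ** (len(second_number) - 1) if second_number else 0
--     for d in second_number: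
--         c = v2 - d * w
--         if c in targets:
--             return c
--         c += w
--         if c in targets:
--             return c
--         w //= 2
--     return None
-- ===== Notes on version B (the rewrite author's own statement) =====
-- stated objective: faster
-- what changed: B converts each numeral to decimal once and derives every single-digit-flip candidate by an O(1) place-value delta, probing a hash set of ternary candidates, instead of A's full base reconversion per candidate plus a nested scan of the two candidate lists.
import Mathlib
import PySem

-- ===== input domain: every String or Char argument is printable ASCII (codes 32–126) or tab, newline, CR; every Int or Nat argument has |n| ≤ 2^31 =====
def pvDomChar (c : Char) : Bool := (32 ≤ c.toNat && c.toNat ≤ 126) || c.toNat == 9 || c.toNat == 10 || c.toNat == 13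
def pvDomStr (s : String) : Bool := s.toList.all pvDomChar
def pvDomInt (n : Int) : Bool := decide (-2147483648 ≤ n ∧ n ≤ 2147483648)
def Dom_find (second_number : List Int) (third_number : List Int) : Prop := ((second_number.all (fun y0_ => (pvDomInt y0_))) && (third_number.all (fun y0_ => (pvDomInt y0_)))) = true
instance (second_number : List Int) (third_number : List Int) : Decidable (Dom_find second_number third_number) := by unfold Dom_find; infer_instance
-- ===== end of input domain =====

-- B replaces A's per-candidate full base reconversion and nested candidate-list scan by a
-- one-time conversion with O(1) per-position deltas and a hash-set probe (objective: faster).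

-- ===== PORT A =====
-- helper `second`: binary list to decimal, loop over range(len)
def pySecond (num : List Int) : Int :=
  (List.range num.length).foldl (fun r i => r + num.getD i 0 * 2 ^ (num.length - i - 1)) 0

-- helper `third`: ternary list to decimal
def pyThird (num : List Int) : Int :=
  (List.range num.length).foldl (fun r i => r + num.getD i 0 * 3 ^ (num.length - i - 1)) 0

-- first loop of A: second_lst (inner j-loop keeps mutating the same copy change_num)
def secondLst (s : List Int) : List Int :=
  (List.range s.length).foldl (fun lst i =>
    ((List.range 2).foldl (fun (st : List Int × List Int) (j : Nat) =>
      let cn := if st.1.getD i 0 ≠ (j : Int) then st.1.set i (j : Int) else st.1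
      (cn, st.2 ++ [pySecond cn])) (s, lst)).2) []

-- second loop of A: third_lst
def thirdLst (t : List Int) : List Int :=
  (List.range t.length).foldl (fun lst i =>
    ((List.range 3).foldl (fun (st : List Int × List Int) (j : Nat) =>
      let cn := if st.1.getD i 0 ≠ (j : Int) then st.1.set i (j : Int) else st.1
      (cn, st.2 ++ [pyThird cn])) (t, lst)).2) []

-- inner `for j in third_lst: if i==j: return i`
def searchInner (i : Int) : List Int → Option Int
  | [] => none
  | j :: rest => if i = j then some i else searchInner i rest

-- outer `for i in second_lst: …` with the early return (falls through to None)
def searchOuter (ys : List Int) : List Int → Option Int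
  | [] => none
  | i :: rest =>
    match searchInner i ys with
    | some v => some v
    | none => searchOuter ys rest

def find (second_number : List Int) (third_number : List Int) : Option Int :=
  searchOuter (thirdLst third_number) (secondLst second_number)

-- ===== PORT B =====
-- `for d in third_number: targets.add(base); …; w //= 3`
def buildTargets (v3 : Int) : List Int → Int → PySem.Set Int → PySem.Set Int
  | [], _, S => S
  | d :: rest, w, S =>
    let base := v3 - d * w
    buildTargets v3 rest (PySem.Int.floordiv w 3) (((S.add base).add (base + w)).add (base + 2 * w))

-- `for d in second_number: probe c, c+w in targets; w //= 2`
def searchB (v2 : Int) (T : PySem.Set Int) : List Int → Int → Option Int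
  | [], _ => none
  | d :: rest, w =>
    let c := v2 - d * w
    if T.contains c then some c
    else if T.contains (c + w) then some (c + w)
    else searchB v2 T rest (PySem.Int.floordiv w 2)

def find_alt (second_number : List Int) (third_number : List Int) : Option Int :=
  let v2 := second_number.foldl (fun a d => 2 * a + d) 0
  let v3 := third_number.foldl (fun a d => 3 * a + d) 0
  let T := buildTargets v3 third_number
    (if third_number.isEmpty then 0 else 3 ^ (third_number.length - 1)) PySem.Set.empty
  searchB v2 T second_number
    (if second_number.isEmpty then 0 else 2 ^ (second_number.length - 1))

-- ===== PRECONDITION & SPEC =====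
def Spec_find (second_number : List Int) (third_number : List Int) (out : Option Int) : Prop := out = find_alt second_number third_number
instance (second_number : List Int) (third_number : List Int) (out : Option Int) : Decidable (Spec_find second_number third_number out) := by unfold Spec_find; infer_instance

-- ===== CLAIM (what is proved, stated in full; the proofs are below) =====
def Claim_equal_find : Prop := ∀ (second_number : List Int) (third_number : List Int), Dom_find second_number third_number → Spec_find second_number third_number (find second_number third_number)

-- ===== LEMMAS AND PROOFS =====

-- the common candidate lists: value with digit i forced to 0,1 (binary) resp. 0,1,2 (ternary)
def cand2 (v : Int) : List Int → List Int
  | [] => []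
  | d :: rest =>
    (v - d * 2 ^ rest.length) :: (v - d * 2 ^ rest.length + 2 ^ rest.length) :: cand2 v rest

def cand3 (v : Int) : List Int → List Int
  | [] => []
  | d :: rest =>
    (v - d * 3 ^ rest.length) :: (v - d * 3 ^ rest.length + 3 ^ rest.length) ::
      (v - d * 3 ^ rest.length + 2 * 3 ^ rest.length) :: cand3 v rest

theorem pySecond_cons (d : Int) (rest : List Int) :
    pySecond (d :: rest) = d * 2 ^ rest.length + pySecond rest := by
  unfold pySecond
  rw [List.length_cons, List.range_succ_eq_map, List.foldl_cons, List.foldl_map]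
  simp only [List.getD_cons_zero, List.getD_cons_succ, Nat.succ_sub_succ, zero_add]
  rw [PySem.List.foldl_add, PySem.List.foldl_add]
  simp

theorem pyThird_cons (d : Int) (rest : List Int) :
    pyThird (d :: rest) = d * 3 ^ rest.length + pyThird rest := by
  unfold pyThird
  rw [List.length_cons, List.range_succ_eq_map, List.foldl_cons, List.foldl_map]
  simp only [List.getD_cons_zero, List.getD_cons_succ, Nat.succ_sub_succ, zero_add]
  rw [PySem.List.foldl_add, PySem.List.foldl_add]
  simp

theorem pySecond_set (num : List Int) (i : Nat) (j : Int) (h : i < num.length) :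
    pySecond (num.set i j) = pySecond num + (j - num.getD i 0) * 2 ^ (num.length - 1 - i) := by
  induction num generalizing i with
  | nil => simp at h
  | cons d rest ih =>
    cases i with
    | zero =>
      simp only [List.set_cons_zero, List.getD_cons_zero, List.length_cons]
      rw [pySecond_cons, pySecond_cons]
      have e : rest.length + 1 - 1 - 0 = rest.length := by omega
      rw [e]; ring
    | succ i =>
      simp only [List.set_cons_succ, List.getD_cons_succ, List.length_cons]
      rw [pySecond_cons, pySecond_cons, List.length_set,
        ih i (by simpa using h)]
      have e : rest.length + 1 - 1 - (i + 1) = rest.length - 1 - i := by omega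
      rw [e]; ring

theorem pyThird_set (num : List Int) (i : Nat) (j : Int) (h : i < num.length) :
    pyThird (num.set i j) = pyThird num + (j - num.getD i 0) * 3 ^ (num.length - 1 - i) := by
  induction num generalizing i with
  | nil => simp at h
  | cons d rest ih =>
    cases i with
    | zero =>
      simp only [List.set_cons_zero, List.getD_cons_zero, List.length_cons]
      rw [pyThird_cons, pyThird_cons]
      have e : rest.length + 1 - 1 - 0 = rest.length := by omega
      rw [e]; ring
    | succ i =>
      simp only [List.set_cons_succ, List.getD_cons_succ, List.length_cons]
      rw [pyThird_cons, pyThird_cons, List.length_set,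
        ih i (by simpa using h)]
      have e : rest.length + 1 - 1 - (i + 1) = rest.length - 1 - i := by omega
      rw [e]; ring

theorem horner2 (xs : List Int) (c : Int) :
    xs.foldl (fun a d => 2 * a + d) c = c * 2 ^ xs.length + pySecond xs := by
  induction xs generalizing c with
  | nil => simp [pySecond]
  | cons d rest ih =>
    rw [List.foldl_cons, ih, pySecond_cons, List.length_cons]
    ring

theorem horner3 (xs : List Int) (c : Int) :
    xs.foldl (fun a d => 3 * a + d) c = c * 3 ^ xs.length + pyThird xs := by
  induction xs generalizing c with
  | nil => simp [pyThird]
  | cons d rest ih =>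
    rw [List.foldl_cons, ih, pyThird_cons, List.length_cons]
    ring

theorem cand2_flatMap (v : Int) (l : List Int) :
    cand2 v l = (List.range l.length).flatMap (fun i =>
      [v - l.getD i 0 * 2 ^ (l.length - 1 - i),
       v - l.getD i 0 * 2 ^ (l.length - 1 - i) + 2 ^ (l.length - 1 - i)]) := by
  induction l with
  | nil => simp [cand2]
  | cons d rest ih =>
    rw [List.length_cons, List.range_succ_eq_map, List.flatMap_cons, List.flatMap_map]
    simp only [List.getD_cons_zero, List.getD_cons_succ, Nat.succ_sub_succ, Nat.sub_zero,
      Nat.succ_eq_add_one]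
    rw [show cand2 v (d :: rest) = (v - d * 2 ^ rest.length) ::
      (v - d * 2 ^ rest.length + 2 ^ rest.length) :: cand2 v rest from rfl, ih]
    simp only [Nat.sub_sub, Nat.add_comm 1]
    rfl

theorem cand3_flatMap (v : Int) (l : List Int) :
    cand3 v l = (List.range l.length).flatMap (fun i =>
      [v - l.getD i 0 * 3 ^ (l.length - 1 - i),
       v - l.getD i 0 * 3 ^ (l.length - 1 - i) + 3 ^ (l.length - 1 - i),
       v - l.getD i 0 * 3 ^ (l.length - 1 - i) + 2 * 3 ^ (l.length - 1 - i)]) := by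
  induction l with
  | nil => simp [cand3]
  | cons d rest ih =>
    rw [List.length_cons, List.range_succ_eq_map, List.flatMap_cons, List.flatMap_map]
    simp only [List.getD_cons_zero, List.getD_cons_succ, Nat.succ_sub_succ, Nat.sub_zero,
      Nat.succ_eq_add_one]
    rw [show cand3 v (d :: rest) = (v - d * 3 ^ rest.length) ::
      (v - d * 3 ^ rest.length + 3 ^ rest.length) ::
      (v - d * 3 ^ rest.length + 2 * 3 ^ rest.length) :: cand3 v rest from rfl, ih]
    simp only [Nat.sub_sub, Nat.add_comm 1]
    rfl

theorem getD_set_self (s : List Int) (i : Nat) (a : Int) (hl : i < s.length) :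
    (s.set i a).getD i 0 = a := by
  simp [List.getD_eq_getElem?_getD, List.getElem?_set_self', List.getElem?_eq_getElem hl]

theorem secondLst_eq (s : List Int) : secondLst s = cand2 (pySecond s) s := by
  rw [secondLst, cand2_flatMap]
  rw [PySem.List.foldl_congr_mem (List.range s.length) _
      (fun lst i => lst ++ [pySecond s - s.getD i 0 * 2 ^ (s.length - 1 - i),
        pySecond s - s.getD i 0 * 2 ^ (s.length - 1 - i) + 2 ^ (s.length - 1 - i)]) []
      ?_, PySem.List.foldl_append_eq_flatMap, List.nil_append]
  intro lst i hi
  have hl : i < s.length := List.mem_range.mp hi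
  rw [show List.range 2 = [0, 1] from rfl, List.foldl_cons, List.foldl_cons, List.foldl_nil]
  simp only [Nat.cast_zero, Nat.cast_one]
  by_cases h0 : s.getD i 0 = 0
  · simp only [h0, ne_eq, not_true_eq_false, ite_false]
    rw [if_pos (by norm_num), pySecond_set s i 1 hl, h0]
    ring_nf
    simp
  · rw [if_pos h0, getD_set_self s i 0 hl]
    rw [if_pos (by norm_num), List.set_set, pySecond_set s i 0 hl, pySecond_set s i 1 hl]
    ring_nf
    simp

theorem thirdLst_eq (t : List Int) : thirdLst t = cand3 (pyThird t) t := by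
  rw [thirdLst, cand3_flatMap]
  rw [PySem.List.foldl_congr_mem (List.range t.length) _
      (fun lst i => lst ++ [pyThird t - t.getD i 0 * 3 ^ (t.length - 1 - i),
        pyThird t - t.getD i 0 * 3 ^ (t.length - 1 - i) + 3 ^ (t.length - 1 - i),
        pyThird t - t.getD i 0 * 3 ^ (t.length - 1 - i) + 2 * 3 ^ (t.length - 1 - i)]) []
      ?_, PySem.List.foldl_append_eq_flatMap, List.nil_append]
  intro lst i hi
  have hl : i < t.length := List.mem_range.mp hi
  rw [show List.range 3 = [0, 1, 2] from rfl, List.foldl_cons, List.foldl_cons, List.foldl_cons,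
    List.foldl_nil]
  simp only [Nat.cast_zero, Nat.cast_one, Nat.cast_ofNat]
  by_cases h0 : t.getD i 0 = 0
  · simp only [h0, ne_eq, not_true_eq_false, ite_false]
    rw [if_pos (by norm_num), getD_set_self t i 1 hl, if_pos (by norm_num), List.set_set,
      pyThird_set t i 1 hl, pyThird_set t i 2 hl, h0]
    ring_nf
    simp
  · rw [if_pos h0, getD_set_self t i 0 hl, if_pos (by norm_num), List.set_set,
      getD_set_self t i 1 hl, if_pos (by norm_num), List.set_set,
      pyThird_set t i 0 hl, pyThird_set t i 1 hl, pyThird_set t i 2 hl]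
    ring_nf
    simp

theorem searchInner_eq (i : Int) (ys : List Int) :
    searchInner i ys = if i ∈ ys then some i else none := by
  induction ys with
  | nil => simp [searchInner]
  | cons y rest ih =>
    rw [searchInner, ih]
    by_cases h : i = y <;> simp [h]

theorem searchOuter_eq (ys xs : List Int) :
    searchOuter ys xs = xs.find? (fun x => decide (x ∈ ys)) := by
  induction xs with
  | nil => simp [searchOuter]
  | cons x rest ih =>
    rw [searchOuter, searchInner_eq, ih]
    by_cases h : x ∈ ys <;> simp [h]

theorem searchB_eq (v2 : Int) (T : PySem.Set Int) (l : List Int) :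
    searchB v2 T l (if l.isEmpty then 0 else 2 ^ (l.length - 1)) =
      (cand2 v2 l).find? (fun c => T.contains c) := by
  induction l with
  | nil => simp [searchB, cand2]
  | cons d rest ih =>
    rw [show ((d :: rest).isEmpty) = false from rfl]
    simp only [Bool.false_eq_true, if_false, List.length_cons, Nat.add_sub_cancel]
    rw [searchB, cand2]
    have hw : PySem.Int.floordiv ((2:Int) ^ rest.length) 2 =
        (if rest.isEmpty then 0 else 2 ^ (rest.length - 1)) := by
      cases rest with
      | nil => decide
      | cons a b =>
        rw [PySem.Int.floordiv_eq_ediv_of_pos (by norm_num)]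
        simp only [List.isEmpty_cons, Bool.false_eq_true, if_false, List.length_cons,
          Nat.add_sub_cancel, pow_succ]
        exact Int.mul_ediv_cancel _ (by norm_num)
    simp only [hw, ih]
    by_cases h1 : v2 - d * 2 ^ rest.length ∈ T <;>
      by_cases h2 : v2 - d * 2 ^ rest.length + 2 ^ rest.length ∈ T <;>
      simp [PySem.Set.contains, h1, h2]

theorem buildTargets_mem (v3 : Int) (l : List Int) (S : PySem.Set Int) (x : Int) :
    x ∈ buildTargets v3 l (if l.isEmpty then 0 else 3 ^ (l.length - 1)) S ↔
      x ∈ S ∨ x ∈ cand3 v3 l := by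
  induction l generalizing S with
  | nil => simp [buildTargets, cand3]
  | cons d rest ih =>
    rw [show ((d :: rest).isEmpty) = false from rfl]
    simp only [Bool.false_eq_true, if_false, List.length_cons, Nat.add_sub_cancel]
    rw [buildTargets]
    have hw : PySem.Int.floordiv ((3:Int) ^ rest.length) 3 =
        (if rest.isEmpty then 0 else 3 ^ (rest.length - 1)) := by
      cases rest with
      | nil => decide
      | cons a b =>
        rw [PySem.Int.floordiv_eq_ediv_of_pos (by norm_num)]
        simp only [List.isEmpty_cons, Bool.false_eq_true, if_false, List.length_cons,
          Nat.add_sub_cancel, pow_succ]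
        exact Int.mul_ediv_cancel _ (by norm_num)
    simp only [hw, ih]
    simp [PySem.Set.mem_add, cand3]
    tauto

-- ===== VERDICT (by name: the statement is the Claim_ definition above) =====
theorem find_spec : Claim_equal_find := by
  intro s t _
  unfold Spec_find find find_alt
  rw [searchOuter_eq, secondLst_eq, thirdLst_eq, horner2, horner3]
  simp only [zero_mul, zero_add]
  rw [searchB_eq]
  congr 1
  funext c
  have hm := buildTargets_mem (pyThird t) t PySem.Set.empty c
  simp only [PySem.Set.empty, List.not_mem_nil, false_or, List.isEmpty_iff] at hm
  simp [PySem.Set.contains, hm.symm]
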